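-- pv_equiv track=rewrite | github.com/bm-harvey/aoc_2023 | robs6.py | clever_math
-- ===== SOURCE A (Python) =====
-- def clever_math(my_array):
--     sum_value =0
--     for index, value in enumerate(my_array):
--         if index == 0:
--             sum_value= my_array[index]
--         elif index > 0:
--                 sum_value= sum_value * 10**int(len(str(my_array[index]))) + my_array[index]
--     return(sum_value)
-- ===== SOURCE B (Python) =====
-- def clever_math(my_array):
--     result = 0
--     shift = 1
--     for value in reversed(my_array):
--         result += value * shift
--         shift *= 10 ** len(str(value))
--     return result
-- ===== Notes on version B (the rewrite author's own statement) =====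
-- stated objective: alternative
-- what changed: Instead of rescaling a running accumulator left-to-right (with a special case for index 0), B walks the list right-to-left maintaining a multiplicative decimal offset `shift` and adds value * shift for each element.
import Mathlib
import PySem

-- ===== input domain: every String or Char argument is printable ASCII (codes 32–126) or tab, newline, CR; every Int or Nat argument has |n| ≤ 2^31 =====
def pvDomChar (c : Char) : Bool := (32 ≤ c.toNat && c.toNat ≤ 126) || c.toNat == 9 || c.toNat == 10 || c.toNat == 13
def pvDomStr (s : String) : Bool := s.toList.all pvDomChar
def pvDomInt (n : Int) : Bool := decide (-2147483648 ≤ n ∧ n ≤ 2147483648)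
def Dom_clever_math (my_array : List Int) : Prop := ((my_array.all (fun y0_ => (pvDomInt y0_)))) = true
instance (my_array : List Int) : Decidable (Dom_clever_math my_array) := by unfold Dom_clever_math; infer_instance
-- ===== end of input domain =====

-- B concatenates the decimal representations right-to-left with a running offset instead of
-- rescaling an accumulator left-to-right; same value on every input (alternative decomposition).

-- ===== PORT A =====
-- literal port of A: fold over enumerate, branching on index == 0 / index > 0, indexing the
-- array via my_array[index] (always in range, so pyGetD is exact); 10**len(str(v)) with
-- len(str(v)) ≥ 1, so .toNat is exact.
def clever_math (my_array : List Int) : Int :=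
  (PySem.List.enumerate my_array).foldl
    (fun sum_value iv =>
      if iv.1 == 0 then PySem.List.pyGetD my_array iv.1 0
      else if iv.1 > 0 then
        sum_value * 10 ^ (PySem.Str.len (PySem.Int.toStr (PySem.List.pyGetD my_array iv.1 0))).toNat
          + PySem.List.pyGetD my_array iv.1 0
      else sum_value) 0

-- ===== PORT B =====
-- literal port of B: fold over the reversed list carrying (result, shift); the exponent
-- len(str(value)) ≥ 1, so .toNat is exact.
def clever_math_alt (my_array : List Int) : Int :=
  (my_array.reverse.foldl
    (fun (st : Int × Int) value =>
      (st.1 + value * st.2, st.2 * 10 ^ (PySem.Str.len (PySem.Int.toStr value)).toNat))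
    (0, 1)).1

-- ===== PRECONDITION & SPEC =====
def Spec_clever_math (my_array : List Int) (out : Int) : Prop := out = clever_math_alt my_array
instance (my_array : List Int) (out : Int) : Decidable (Spec_clever_math my_array out) := by unfold Spec_clever_math; infer_instance

-- ===== CLAIM (what is proved, stated in full; the proofs are below) =====
def Claim_equal_clever_math : Prop := ∀ (my_array : List Int), Dom_clever_math my_array → Spec_clever_math my_array (clever_math my_array)

-- ===== LEMMAS AND PROOFS =====

/-- number of characters of str(v), as a Nat (always ≥ 1). -/
def pvL (v : Int) : Nat := (PySem.Str.len (PySem.Int.toStr v)).toNat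

/-- the common mathematical core: left fold `a ↦ a * 10^len(str v) + v`. -/
def pvg (xs : List Int) (s : Int) : Int :=
  xs.foldl (fun a v => a * 10 ^ pvL v + v) s

def pvT (xs : List Int) : Nat := (xs.map pvL).sum

lemma pvg_cons (a : Int) (t : List Int) (s : Int) :
    pvg (a :: t) s = pvg t (s * 10 ^ pvL a + a) := rfl

/-- A's enumerate fold with indices starting at s ≥ 1 is the plain fold pvg. -/
lemma pvA_tail (xs : List Int) (s : Int) (hs : 1 ≤ s) (acc : Int) :
    (PySem.List.enumerate xs s).foldl
      (fun a (iv : Int × Int) =>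
        if iv.1 == 0 then iv.2
        else if iv.1 > 0 then a * 10 ^ pvL iv.2 + iv.2 else a) acc
    = pvg xs acc := by
  induction xs generalizing s acc with
  | nil => simp [pvg]
  | cons v t ih =>
    rw [PySem.List.enumerate_cons]
    simp only [List.foldl_cons]
    have h0 : (s == 0) = false := by simp; omega
    have h1 : s > 0 := by omega
    rw [pvg_cons]
    simp only [h0, if_pos h1, Bool.false_eq_true, if_false]
    exact ih (s + 1) (by omega) _

/-- clever_math computes pvg xs 0. -/
lemma clever_math_eq_pvg (xs : List Int) : clever_math xs = pvg xs 0 := by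
  unfold clever_math
  have hcongr :
      (PySem.List.enumerate xs).foldl
        (fun sum_value iv =>
          if iv.1 == 0 then PySem.List.pyGetD xs iv.1 0
          else if iv.1 > 0 then
            sum_value * 10 ^ (PySem.Str.len (PySem.Int.toStr (PySem.List.pyGetD xs iv.1 0))).toNat
              + PySem.List.pyGetD xs iv.1 0
          else sum_value) 0
      = (PySem.List.enumerate xs).foldl
        (fun a (iv : Int × Int) =>
          if iv.1 == 0 then iv.2
          else if iv.1 > 0 then a * 10 ^ pvL iv.2 + iv.2 else a) 0 := by
    apply PySem.List.foldl_congr_mem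
    intro acc p hp
    rcases (PySem.List.mem_enumerate_iff _ _ _).1 hp with ⟨k, hk, rfl⟩
    have hget : PySem.List.pyGetD xs ((0 : Int) + (k : Int)) 0 = xs[k] := by
      rw [zero_add, PySem.List.pyGetD_natCast, List.getD_eq_getElem?_getD,
        List.getElem?_eq_getElem hk, Option.getD_some]
    have h2 : xs[k]?.getD 0 = xs[k] := by rw [List.getElem?_eq_getElem hk]; rfl
    simp [pvL, h2]
  rw [hcongr]
  cases xs with
  | nil => simp [pvg]
  | cons v t =>
    rw [PySem.List.enumerate_cons]
    simp only [List.foldl_cons]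
    have : ((0 : Int) == 0) = true := by decide
    simp only [this, if_pos]
    rw [pvA_tail t (0 + 1) (by omega) v, pvg_cons]
    norm_num

/-- invariant of B's fold. -/
lemma pvB_inv (ys : List Int) (r q : Int) :
    ys.foldl
      (fun (st : Int × Int) value =>
        (st.1 + value * st.2, st.2 * 10 ^ (PySem.Str.len (PySem.Int.toStr value)).toNat))
      (r, q)
    = (r + pvg ys.reverse 0 * q, q * 10 ^ pvT ys) := by
  induction ys generalizing r q with
  | nil => simp [pvg, pvT]
  | cons v t ih =>
    simp only [List.foldl_cons]
    rw [ih]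
    have hg : pvg (t.reverse ++ [v]) 0
        = pvg t.reverse 0 * 10 ^ pvL v + v := by
      simp [pvg, List.foldl_append]
    simp only [Prod.mk.injEq, List.reverse_cons, hg, pvT, List.map_cons, List.sum_cons,
      pow_add, pvL]
    exact ⟨by ring, by ring⟩

lemma clever_math_alt_eq_pvg (xs : List Int) : clever_math_alt xs = pvg xs 0 := by
  unfold clever_math_alt
  rw [pvB_inv xs.reverse 0 1]
  simp

-- ===== VERDICT (by name: the statement is the Claim_ definition above) =====
theorem clever_math_spec : Claim_equal_clever_math := by
  intro xs _
  unfold Spec_clever_math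
  rw [clever_math_eq_pvg, clever_math_alt_eq_pvg]
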